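-- pv_equiv track=rewrite | github.com/linuschoudhury/codetree | 250320/100으로 나눈 나머지의 수열/sequence-of-remainder-divided-by-100.py | func
-- ===== SOURCE A (Python) =====
-- def func(n):
--     if n==0:
--         return 1
--     if n==1:
--         return 2
--     if n==2:
--         return 4
--     return (func(n-1)*func(n-2))%100
-- ===== SOURCE B (Python) =====
-- def func(n):
--     if n == 0:
--         return 1
--     a, b = 2, 4
--     for _ in range(n - 1):
--         a, b = b, a * b % 100
--     return a
-- ===== Notes on version B (the rewrite author's own statement) =====
-- stated objective: faster
-- what changed: Replaces the naive double recursion with a bottom-up loop carrying the last two values mod 100.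
import Mathlib
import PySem

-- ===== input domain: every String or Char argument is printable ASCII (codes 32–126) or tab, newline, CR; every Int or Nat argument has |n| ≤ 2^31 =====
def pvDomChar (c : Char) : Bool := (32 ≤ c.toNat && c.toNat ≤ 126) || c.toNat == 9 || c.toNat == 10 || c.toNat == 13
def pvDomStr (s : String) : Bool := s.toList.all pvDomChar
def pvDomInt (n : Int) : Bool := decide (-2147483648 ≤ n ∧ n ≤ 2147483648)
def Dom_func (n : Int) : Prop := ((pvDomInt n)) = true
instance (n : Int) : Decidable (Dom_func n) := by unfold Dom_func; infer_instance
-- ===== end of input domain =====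

-- B replaces A's naive double recursion with a bottom-up loop keeping the last two values mod 100 (asymptotically faster).


-- ===== PORT A =====
-- A's recursion, on n.toNat (Pre_func restricts to n ≥ 0, where the Python recursion terminates)
def funcRec : Nat → Int
  | 0 => 1
  | 1 => 2
  | 2 => 4
  | (k+3) => PySem.Int.mod (funcRec (k+2) * funcRec (k+1)) 100

def func (n : Int) : Int := funcRec n.toNat

-- ===== PORT B =====
-- Source B's loop: runs len(range(n-1)) = (n-1).toNat times over the state (a, b)
def funcLoop : Nat → Int × Int → Int × Int
  | 0, p => p
  | (k+1), (a, b) => funcLoop k (b, PySem.Int.mod (a * b) 100)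

def func_alt (n : Int) : Int :=
  if n = 0 then 1 else (funcLoop (n - 1).toNat (2, 4)).1

-- ===== PRECONDITION & SPEC =====
-- On n < 0 the Python A recurses forever downward and raises RecursionError.
def Pre_func (n : Int) : Prop := 0 ≤ n
instance (n : Int) : Decidable (Pre_func n) := by unfold Pre_func; infer_instance
def pvWitness_func : Int := 5

def Spec_func (n : Int) (out : Int) : Prop := out = func_alt n
instance (n : Int) (out : Int) : Decidable (Spec_func n out) := by unfold Spec_func; infer_instance

-- ===== CLAIM (what is proved, stated in full; the proofs are below) =====
def Claim_equal_func : Prop := ∀ (n : Int), Dom_func n → Pre_func n → Spec_func n (func n)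

-- ===== LEMMAS AND PROOFS =====
lemma funcLoop_inv (k j : Nat) :
    funcLoop k (funcRec (j+1), funcRec (j+2)) = (funcRec (k+j+1), funcRec (k+j+2)) := by
  induction k generalizing j with
  | zero => simp [funcLoop]
  | succ k ih =>
      have h : funcRec (j+1) * funcRec (j+2) % 100 = funcRec (j+3) := by
        simp [funcRec, PySem.Int.mod, Int.fmod_eq_emod, mul_comm]
      calc funcLoop (k+1) (funcRec (j+1), funcRec (j+2))
          = funcLoop k (funcRec (j+2), funcRec (j+3)) := by simp [funcLoop]; rw [h]
        _ = (funcRec (k+(j+1)+1), funcRec (k+(j+1)+2)) := ih (j+1)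
        _ = (funcRec (k+1+j+1), funcRec (k+1+j+2)) := by ring_nf

-- ===== VERDICT (by name: the statement is the Claim_ definition above) =====
theorem func_spec : Claim_equal_func := by
  intro n _ hpre
  unfold Pre_func at hpre
  unfold Spec_func func func_alt
  by_cases h0 : n = 0
  · simp [h0, funcRec]
  · have h1 : 1 ≤ n := by omega
    have hloop := funcLoop_inv (n - 1).toNat 0
    simp only [funcRec] at hloop
    rw [if_neg h0, hloop]
    have h2 : (n - 1).toNat + 0 + 1 = n.toNat := by omega
    rw [h2]
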